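-- pv_equiv track=rewrite | github.com/mario-bermonti/wdiff | wanalysis.py | swap_c_for_s_check
-- ===== SOURCE A (Python) =====
-- def swap_c_for_s_check(word):
--     """Checks how many c's in the word word sound like s's so they can be
--     swapped with s's by mistake.
--     """
--
--     cCompliantCount = 0
--     cCount = word.count("c")
--     cPositions = list()
--     start = 0
--
--     while cCount > 0:
--         cPosition = word.find("c", start)
--         cPositions.append(cPosition)
--         start = cPosition + 1
--         cCount -= 1
--
--     for position in cPositions:
--         if position == (len(word) - 1):
--             continue
--         if word[position+1] == 'i' or word[position+1] == "e":
--             cCompliantCount += 1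
--
--     return cCompliantCount
-- ===== SOURCE B (Python) =====
-- def swap_c_for_s_check(word):
--     """Checks how many c's in the word word sound like s's so they can be
--     swapped with s's by mistake.
--     """
--     return word.count("ci") + word.count("ce")
-- ===== Notes on version B (the rewrite author's own statement) =====
-- stated objective: simpler
-- what changed: Replaces the find-loop that collects every c-position plus a second indexing pass with two non-overlapping substring counts, word.count('ci') + word.count('ce'); exact because a 2-char pattern starting with 'c' whose second char is not 'c' can never overlap another occurrence, and the two patterns are disjoint.
import Mathlib
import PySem

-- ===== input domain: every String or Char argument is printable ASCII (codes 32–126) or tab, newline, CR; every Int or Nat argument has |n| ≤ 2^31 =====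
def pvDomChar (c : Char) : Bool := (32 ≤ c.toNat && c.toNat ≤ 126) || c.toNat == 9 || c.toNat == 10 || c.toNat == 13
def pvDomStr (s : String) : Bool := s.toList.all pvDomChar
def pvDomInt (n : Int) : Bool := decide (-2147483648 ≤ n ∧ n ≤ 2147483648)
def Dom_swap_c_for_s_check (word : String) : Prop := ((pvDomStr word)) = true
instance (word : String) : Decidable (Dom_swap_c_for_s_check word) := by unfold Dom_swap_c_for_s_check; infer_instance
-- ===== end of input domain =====

-- B replaces A's find-loop over 'c' positions plus a second indexing pass with two
-- non-overlapping substring counts word.count("ci") + word.count("ce") (simpler; exact).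


-- ===== PORT A =====
-- the 'while cCount > 0' loop: cCount is the loop counter, start / cPositions the mutable state
def swapLoopA (word : String) : Nat → Int → List Int → List Int
  | 0, _, cPositions => cPositions
  | Nat.succ cCount, start, cPositions =>
      let cPosition := PySem.Str.findFrom word "c" start
      swapLoopA word cCount (cPosition + 1) (cPositions ++ [cPosition])

-- word[position+1] is compared through pyGet?; the index is always in range when A runs
-- (position is a found 'c' position and position ≠ len-1), so 'some' always matches.
def swap_c_for_s_check (word : String) : Int :=
  let cCompliantCount : Int := 0
  let cCount := PySem.Str.count word "c"
  let cPositions := swapLoopA word cCount 0 []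
  cPositions.foldl (fun acc position =>
    if position = PySem.Str.len word - 1 then acc
    else if PySem.Str.pyGet? word (position + 1) = some 'i' ∨
            PySem.Str.pyGet? word (position + 1) = some 'e' then acc + 1
    else acc) cCompliantCount

-- ===== PORT B =====
def swap_c_for_s_check_alt (word : String) : Int :=
  (PySem.Str.count word "ci" : Int) + (PySem.Str.count word "ce" : Int)

-- ===== PRECONDITION & SPEC =====
def Spec_swap_c_for_s_check (word : String) (out : Int) : Prop := out = swap_c_for_s_check_alt word
instance (word : String) (out : Int) : Decidable (Spec_swap_c_for_s_check word out) := by unfold Spec_swap_c_for_s_check; infer_instance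

-- ===== CLAIM (what is proved, stated in full; the proofs are below) =====
def Claim_equal_swap_c_for_s_check : Prop := ∀ (word : String), Dom_swap_c_for_s_check word → Spec_swap_c_for_s_check word (swap_c_for_s_check word)

-- ===== LEMMAS AND PROOFS =====

-- the common specification: number of adjacent pairs ('c','i') or ('c','e')
def pairCount : List Char → Int
  | a :: b :: t => (if a = 'c' ∧ (b = 'i' ∨ b = 'e') then 1 else 0) + pairCount (b :: t)
  | _ => 0

-- non-overlapping occurrence counters matching Chars.count for "ci" / "ce"
def ciCount : List Char → Nat
  | a :: b :: t => if a = 'c' ∧ b = 'i' then 1 + ciCount t else ciCount (b :: t)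
  | _ => 0

def ceCount : List Char → Nat
  | a :: b :: t => if a = 'c' ∧ b = 'e' then 1 + ceCount t else ceCount (b :: t)
  | _ => 0

lemma pairCount_cons (a : Char) (t : List Char) :
    pairCount (a :: t) =
      (if a = 'c' ∧ (t.head? = some 'i' ∨ t.head? = some 'e') then 1 else 0) + pairCount t := by
  cases t <;> simp [pairCount]

lemma pairCount_append_of_not_mem (pre rest : List Char) (h : 'c' ∉ pre) :
    pairCount (pre ++ rest) = pairCount rest := by
  induction pre with
  | nil => rfl
  | cons a p ih =>
      have ha : a ≠ 'c' := by intro h'; exact h (h' ▸ List.mem_cons_self ..)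
      simp only [List.cons_append, pairCount_cons, ih (fun hm => h (List.mem_cons_of_mem _ hm))]
      simp [ha]

lemma pairCount_eq_zero_of_not_mem (l : List Char) (h : 'c' ∉ l) : pairCount l = 0 := by
  simpa using pairCount_append_of_not_mem l [] h

lemma ciCount_cons_of_ne (b : Char) (t : List Char) (hb : b ≠ 'c') :
    ciCount (b :: t) = ciCount t := by
  cases t <;> simp [ciCount, hb]

lemma ceCount_cons_of_ne (b : Char) (t : List Char) (hb : b ≠ 'c') :
    ceCount (b :: t) = ceCount t := by
  cases t <;> simp [ceCount, hb]

lemma ci_add_ce_eq_pairCount (l : List Char) :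
    (ciCount l : Int) + (ceCount l : Int) = pairCount l := by
  induction hn : l.length using Nat.strong_induction_on generalizing l with
  | _ n ih =>
    match l with
    | [] => simp [ciCount, ceCount, pairCount]
    | [a] => simp [ciCount, ceCount, pairCount]
    | a :: b :: t =>
      simp only [List.length_cons] at hn
      have h1 := ih (t.length + 1) (by omega) (b :: t) (by simp)
      by_cases hci : a = 'c' ∧ b = 'i'
      · obtain ⟨ha, hb⟩ := hci; subst ha; subst hb
        have hci' : ciCount ('i' :: t) = ciCount t := ciCount_cons_of_ne _ _ (by decide)
        simp [ciCount, ceCount, pairCount]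
        omega
      · by_cases hce : a = 'c' ∧ b = 'e'
        · obtain ⟨ha, hb⟩ := hce; subst ha; subst hb
          have hce' : ceCount ('e' :: t) = ceCount t := ceCount_cons_of_ne _ _ (by decide)
          simp [ciCount, ceCount, pairCount]
          omega
        · have hp : ¬ (a = 'c' ∧ (b = 'i' ∨ b = 'e')) := by
            rintro ⟨h1', h2 | h2⟩
            · exact hci ⟨h1', h2⟩
            · exact hce ⟨h1', h2⟩
          simp only [ciCount, ceCount, pairCount, if_neg hci, if_neg hce, if_neg hp]
          omega

lemma countgo_ci (l : List Char) (fuel : Nat) (acc : Nat) (h : l.length ≤ fuel) :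
    PySem.Chars.count.go ['c', 'i'] fuel l acc = acc + ciCount l := by
  induction fuel generalizing l acc with
  | zero =>
    have : l = [] := by cases l <;> simp_all
    subst this; simp [PySem.Chars.count.go, ciCount]
  | succ fuel ih =>
    match l with
    | [] => simp [PySem.Chars.count.go, ciCount]
    | [a] =>
      have : ¬ (['c','i'].isPrefixOf [a] = true) := by simp [List.isPrefixOf]
      simp only [PySem.Chars.count.go, if_neg this, ciCount]
      exact ih [] acc (by simp)
    | a :: b :: t =>
      simp only [List.length_cons] at h
      by_cases hci : a = 'c' ∧ b = 'i'
      · have hpre : ['c','i'].isPrefixOf (a :: b :: t) = true := by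
          simp [List.isPrefixOf, hci.1, hci.2]
        simp only [PySem.Chars.count.go, if_pos hpre]
        have : List.drop (['c','i'] : List Char).length (a :: b :: t) = t := by simp
        rw [this, ih t (acc + 1) (by omega)]
        simp only [ciCount, if_pos hci]
        omega
      · have hpre : ¬ (['c','i'].isPrefixOf (a :: b :: t) = true) := by
          simp only [List.isPrefixOf]
          simp only [Bool.and_eq_true, beq_iff_eq]
          rintro ⟨h1, h2, -⟩
          exact hci ⟨h1.symm, h2.symm⟩
        simp only [PySem.Chars.count.go, if_neg hpre]
        rw [ih (b :: t) acc (by simpa using by omega)]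
        simp only [ciCount, if_neg hci]

lemma countgo_ce (l : List Char) (fuel : Nat) (acc : Nat) (h : l.length ≤ fuel) :
    PySem.Chars.count.go ['c', 'e'] fuel l acc = acc + ceCount l := by
  induction fuel generalizing l acc with
  | zero =>
    have : l = [] := by cases l <;> simp_all
    subst this; simp [PySem.Chars.count.go, ceCount]
  | succ fuel ih =>
    match l with
    | [] => simp [PySem.Chars.count.go, ceCount]
    | [a] =>
      have : ¬ (['c','e'].isPrefixOf [a] = true) := by simp [List.isPrefixOf]
      simp only [PySem.Chars.count.go, if_neg this, ceCount]
      exact ih [] acc (by simp)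
    | a :: b :: t =>
      simp only [List.length_cons] at h
      by_cases hce : a = 'c' ∧ b = 'e'
      · have hpre : ['c','e'].isPrefixOf (a :: b :: t) = true := by
          simp [List.isPrefixOf, hce.1, hce.2]
        simp only [PySem.Chars.count.go, if_pos hpre]
        have : List.drop (['c','e'] : List Char).length (a :: b :: t) = t := by simp
        rw [this, ih t (acc + 1) (by omega)]
        simp only [ceCount, if_pos hce]
        omega
      · have hpre : ¬ (['c','e'].isPrefixOf (a :: b :: t) = true) := by
          simp only [List.isPrefixOf]
          simp only [Bool.and_eq_true, beq_iff_eq]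
          rintro ⟨h1, h2, -⟩
          exact hce ⟨h1.symm, h2.symm⟩
        simp only [PySem.Chars.count.go, if_neg hpre]
        rw [ih (b :: t) acc (by simpa using by omega)]
        simp only [ceCount, if_neg hce]

lemma count_single (l : List Char) (fuel : Nat) (acc : Nat) (h : l.length ≤ fuel) :
    PySem.Chars.count.go ['c'] fuel l acc = acc + l.count 'c' := by
  induction fuel generalizing l acc with
  | zero =>
    have : l = [] := by cases l <;> simp_all
    subst this; simp [PySem.Chars.count.go]
  | succ fuel ih =>
    match l with
    | [] => simp [PySem.Chars.count.go]
    | a :: t =>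
      simp only [List.length_cons] at h
      by_cases ha : a = 'c'
      · have hpre : ['c'].isPrefixOf (a :: t) = true := by simp [List.isPrefixOf, ha]
        simp only [PySem.Chars.count.go, if_pos hpre]
        have : List.drop (['c'] : List Char).length (a :: t) = t := by simp
        rw [this, ih t (acc + 1) (by omega)]
        subst ha
        simp
        omega
      · have hpre : ¬ (['c'].isPrefixOf (a :: t) = true) := by
          simp [List.isPrefixOf]
          intro h'; exact ha h'.symm
        simp only [PySem.Chars.count.go, if_neg hpre]
        rw [ih t acc (by omega)]
        simp [ha]

lemma findgo_c (pre suf : List Char) (h : 'c' ∉ pre) (k : Nat) :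
    PySem.Chars.find.go ['c'] (pre ++ 'c' :: suf) k = (k : Int) + pre.length := by
  induction pre generalizing k with
  | nil =>
    have hpre : ['c'].isPrefixOf ('c' :: suf) = true := by simp [List.isPrefixOf]
    simp [PySem.Chars.find.go, hpre]
  | cons a p ih =>
    have ha : a ≠ 'c' := fun h' => h (h' ▸ List.mem_cons_self ..)
    have hpre : ¬ (['c'].isPrefixOf (a :: (p ++ 'c' :: suf)) = true) := by
      simp [List.isPrefixOf]
      intro h'; exact ha h'.symm
    simp only [List.cons_append, PySem.Chars.find.go, if_neg hpre]
    rw [ih (fun hm => h (List.mem_cons_of_mem _ hm)) (k + 1)]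
    simp only [List.length_cons]
    push_cast; omega

-- the inner-pass step function of port A
def stepA (w : String) (acc : Int) (position : Int) : Int :=
  if position = PySem.Str.len w - 1 then acc
  else if PySem.Str.pyGet? w (position + 1) = some 'i' ∨
          PySem.Str.pyGet? w (position + 1) = some 'e' then acc + 1
  else acc

lemma stepA_shift (w : String) (a : Int) (l : List Int) :
    l.foldl (stepA w) a = a + l.foldl (stepA w) 0 := by
  induction l generalizing a with
  | nil => simp
  | cons x l ih =>
    simp only [List.foldl_cons]
    rw [ih (stepA w a x), ih (stepA w 0 x)]
    have : stepA w a x = a + stepA w 0 x := by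
      unfold stepA; split_ifs <;> omega
    omega

lemma swapLoopA_acc (w : String) (n : Nat) (st : Int) (acc : List Int) :
    swapLoopA w n st acc = acc ++ swapLoopA w n st [] := by
  induction n generalizing st acc with
  | zero => simp [swapLoopA]
  | succ n ih =>
    simp only [swapLoopA]
    rw [ih _ (acc ++ _), ih _ ([] ++ _)]
    simp

lemma mainA (w : String) (n k : Nat) (hk : k ≤ w.toList.length)
    (hc : (w.toList.drop k).count 'c' = n) :
    (swapLoopA w n (k : Int) []).foldl (stepA w) 0 = pairCount (w.toList.drop k) := by
  induction n generalizing k with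
  | zero =>
    rw [pairCount_eq_zero_of_not_mem _ (List.count_eq_zero.mp hc)]
    simp [swapLoopA]
  | succ n ih =>
    have hcs : 'c' ∈ w.toList.drop k := by
      rw [← List.count_pos_iff]; omega
    obtain ⟨j, hj⟩ : ∃ j, PySem.List.index? (w.toList.drop k) 'c' = some j := by
      have := (PySem.List.index?_isSome_iff (w.toList.drop k) 'c').mpr hcs
      exact Option.isSome_iff_exists.mp this
    obtain ⟨pre, suf, hsplit, hlen, hnot⟩ := (PySem.List.index?_eq_some_iff _ _ _).mp hj
    -- the first 'c' at offset j = pre.length in the dropped suffix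
    have hfind : PySem.Chars.find (w.toList.drop k) ['c'] = (pre.length : Int) := by
      rw [hsplit]
      show PySem.Chars.find.go ['c'] (pre ++ 'c' :: suf) 0 = (pre.length : Int)
      rw [findgo_c pre suf hnot 0]
      simp
    have hff : PySem.Str.findFrom w "c" (k : Int) = ((k + pre.length : Nat) : Int) := by
      have h := PySem.Chars.findFrom_natCast w.toList ['c'] k hk
      simp only [PySem.Str.findFrom_eq]
      have : ("c".toList : List Char) = ['c'] := by decide
      rw [this, h, hfind]
      simp only [if_neg (by omega : ¬ ((pre.length : Int) = -1))]
      push_cast; ring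
    have hslen : (w.toList.drop k).length = pre.length + 1 + suf.length := by
      rw [hsplit]; simp; omega
    have hlen2 : w.toList.length = k + (pre.length + 1 + suf.length) := by
      have h := hslen
      rw [List.length_drop] at h
      omega
    have hdropnext : w.toList.drop (k + pre.length + 1) = suf := by
      have h1 : w.toList.drop (k + pre.length + 1) = (w.toList.drop k).drop (pre.length + 1) := by
        rw [List.drop_drop]; ring_nf
      rw [h1, hsplit]
      have : pre ++ 'c' :: suf = (pre ++ ['c']) ++ suf := by simp
      rw [this]
      have hl : (pre ++ ['c']).length = pre.length + 1 := by simp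
      rw [← hl, List.drop_left]
    have hcount : suf.count 'c' = n := by
      have := hc
      rw [hsplit] at this
      have hpre0 : pre.count 'c' = 0 := List.count_eq_zero.mpr hnot
      simp [List.count_append] at this
      omega
    -- unfold one loop iteration
    have hstep1 : swapLoopA w (n + 1) (k : Int) [] =
        [((k + pre.length : Nat) : Int)] ++ swapLoopA w n ((k + pre.length + 1 : Nat) : Int) [] := by
      show (let cPosition := PySem.Str.findFrom w "c" (k : Int);
            swapLoopA w n (cPosition + 1) ([] ++ [cPosition])) = _
      simp only [hff, List.nil_append]
      rw [swapLoopA_acc]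
      have hcast : ((k + pre.length : Nat) : Int) + 1 = ((k + pre.length + 1 : Nat) : Int) := by
        push_cast; ring
      rw [hcast]
    rw [hstep1, List.foldl_append, stepA_shift]
    have hih := ih (k + pre.length + 1) (by omega) (by rw [hdropnext]; exact hcount)
    rw [hih, hdropnext]
    -- right-hand side
    rw [hsplit, pairCount_append_of_not_mem pre _ hnot, pairCount_cons]
    have hgoal : (([((k + pre.length : Nat) : Int)]).foldl (stepA w) 0) =
        (if 'c' = 'c' ∧ (suf.head? = some 'i' ∨ suf.head? = some 'e') then 1 else 0) := by
      simp only [List.foldl_cons, List.foldl_nil]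
      unfold stepA
      have hlenw : PySem.Str.len w = (w.toList.length : Int) := by
        rw [PySem.Str.len_eq]
      match suf with
      | [] =>
        have hlast : ((k + pre.length : Nat) : Int) = PySem.Str.len w - 1 := by
          rw [hlenw]
          simp only [List.length_nil] at hlen2
          omega
        rw [if_pos hlast]
        simp
      | d :: suf' =>
        have hnotlast : ¬ (((k + pre.length : Nat) : Int) = PySem.Str.len w - 1) := by
          rw [hlenw]
          simp only [List.length_cons] at hlen2
          omega
        rw [if_neg hnotlast]
        have hget : PySem.Str.pyGet? w (((k + pre.length : Nat) : Int) + 1) = some d := by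
          have hc1 : (((k + pre.length : Nat) : Int) + 1) = ((k + (pre.length + 1) : Nat) : Int) := by
            push_cast; ring
          rw [hc1, PySem.Str.pyGet?_natCast]
          have h2 : w.toList[(k + (pre.length + 1))]? = (w.toList.drop k)[pre.length + 1]? := by
            rw [List.getElem?_drop]
          rw [h2, hsplit]
          have : pre ++ 'c' :: (d :: suf') = (pre ++ ['c']) ++ (d :: suf') := by simp
          rw [this]
          have hl : pre.length + 1 = (pre ++ ['c']).length + 0 := by simp
          rw [hl, List.getElem?_append_right (by omega)]
          simp
        rw [hget]
        by_cases hd : d = 'i' ∨ d = 'e'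
        · rw [if_pos (by simpa using hd)]
          simp [List.head?]
          tauto
        · rw [if_neg (by simpa using hd)]
          simp [List.head?]
          tauto
    rw [hgoal]

lemma count_c_eq (w : String) : PySem.Str.count w "c" = w.toList.count 'c' := by
  have : ("c".toList : List Char) = ['c'] := by decide
  simp only [PySem.Str.count_eq, this]
  unfold PySem.Chars.count
  rw [if_neg (by simp)]
  rw [count_single w.toList w.toList.length 0 (le_refl _)]
  omega

lemma count_ci_eq (w : String) : PySem.Str.count w "ci" = ciCount w.toList := by
  have : ("ci".toList : List Char) = ['c', 'i'] := by decide
  simp only [PySem.Str.count_eq, this]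
  unfold PySem.Chars.count
  rw [if_neg (by simp)]
  rw [countgo_ci w.toList w.toList.length 0 (le_refl _)]
  omega

lemma count_ce_eq (w : String) : PySem.Str.count w "ce" = ceCount w.toList := by
  have : ("ce".toList : List Char) = ['c', 'e'] := by decide
  simp only [PySem.Str.count_eq, this]
  unfold PySem.Chars.count
  rw [if_neg (by simp)]
  rw [countgo_ce w.toList w.toList.length 0 (le_refl _)]
  omega

-- ===== VERDICT (by name: the statement is the Claim_ definition above) =====
theorem swap_c_for_s_check_spec : Claim_equal_swap_c_for_s_check := by
  intro word _
  unfold Spec_swap_c_for_s_check swap_c_for_s_check swap_c_for_s_check_alt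
  show (swapLoopA word (PySem.Str.count word "c") 0 []).foldl (stepA word) 0 =
    (PySem.Str.count word "ci" : Int) + (PySem.Str.count word "ce" : Int)
  rw [count_ci_eq, count_ce_eq, ci_add_ce_eq_pairCount]
  have h := mainA word (word.toList.count 'c') 0 (by omega) (by simp)
  rw [count_c_eq]
  simpa using h
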